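-- pv_equiv track=rewrite | github.com/GTHAP/Interview_Questions | Adjacency_list_depth_first_search.py | DFS
-- ===== SOURCE A (Python) =====
-- def DFS(table, source):
--     stack = [source]
--     visited = []
--     result = []
--     while stack:
--         current = stack.pop()
--         if current not in visited:
--             visited.append(current)
--             result.append(current)
--         for node in table:
--             if node not in visited:
--                 stack.append(node)
--     return result
-- ===== SOURCE B (Python) =====
-- def DFS(table, source):
--     # One pass: the stack discipline of A visits the source first, then the
--     # table nodes in order of first occurrence scanning from the end.
--     seen = {source}
--     out = [source]
--     for n in reversed(table):
--         if n not in seen: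
--             seen.add(n)
--             out.append(n)
--     return out
-- ===== Notes on version B (the rewrite author's own statement) =====
-- stated objective: faster
-- what changed: Replaced the stack/visited-list simulation (which rescans the whole table after every pop and tests membership in a list) by a single reverse pass over the table with a hash set, emitting source then each table node's first occurrence from the end.
import Mathlib
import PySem

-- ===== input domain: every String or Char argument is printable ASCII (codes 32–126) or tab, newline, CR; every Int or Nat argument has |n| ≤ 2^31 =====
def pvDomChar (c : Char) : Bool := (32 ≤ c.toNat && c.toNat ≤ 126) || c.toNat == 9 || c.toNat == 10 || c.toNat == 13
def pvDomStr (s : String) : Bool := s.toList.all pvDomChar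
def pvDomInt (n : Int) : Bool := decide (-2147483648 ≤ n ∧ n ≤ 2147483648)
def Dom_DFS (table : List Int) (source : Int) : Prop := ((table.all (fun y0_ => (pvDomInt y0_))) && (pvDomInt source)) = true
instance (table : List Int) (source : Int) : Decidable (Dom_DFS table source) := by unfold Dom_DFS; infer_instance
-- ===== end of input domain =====

-- B replaces A's stack/visited-list simulation by a single reverse pass over the
-- table with a set, emitting source then each node's first occurrence from the end
-- (objective: faster; a timing run measures the speed-up).


-- ===== PORT A =====
-- The Python stack (append/pop at the END) is represented with the top at the
-- Lean list HEAD: 'stack.pop()' = match on 'c :: st', 'stack.append(n)' = 'n :: s'.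
-- 'result' always equals 'visited' (they receive the same appends), so the loop
-- carries one list 'v' for both. The while-loop is fuel recursion; the fuel
-- (table.length+1)^2+1 is a guard making the recursion total — the equivalence
-- proof shows the loop always drains the stack within it.
def DFSloop (table : List Int) : Nat → List Int → List Int → List Int
  | 0, _, v => v
  | _ + 1, [], v => v
  | f + 1, c :: st, v =>
      let v' := if c ∈ v then v else v ++ [c]
      DFSloop table f (table.foldl (fun s n => if n ∈ v' then s else n :: s) st) v'

def DFS (table : List Int) (source : Int) : List Int :=
  DFSloop table ((table.length + 1) * (table.length + 1) + 1) [source] []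

-- ===== PORT B =====
def DFS_alt (table : List Int) (source : Int) : List Int :=
  let init : PySem.Set Int × List Int := (PySem.Set.ofList [source], [source])
  (table.reverse.foldl
    (fun p n => if PySem.Set.contains p.1 n then p else (PySem.Set.add p.1 n, p.2 ++ [n]))
    init).2

-- ===== PRECONDITION & SPEC =====
def Spec_DFS (table : List Int) (source : Int) (out : List Int) : Prop := out = DFS_alt table source
instance (table : List Int) (source : Int) (out : List Int) : Decidable (Spec_DFS table source out) := by unfold Spec_DFS; infer_instance

-- ===== CLAIM (what is proved, stated in full; the proofs are below) =====
def Claim_equal_DFS : Prop := ∀ (table : List Int) (source : Int), Dom_DFS table source → Spec_DFS table source (DFS table source)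

-- ===== LEMMAS AND PROOFS =====

-- normal form: first occurrences of r not in v, scanning r left to right
def ded (r : List Int) (v : List Int) : List Int :=
  match r with
  | [] => []
  | n :: r' => if n ∈ v then ded r' v else n :: ded r' (v ++ [n])

-- the push loop of A, as filter
theorem push_eq (table : List Int) (v st : List Int) :
    table.foldl (fun s n => if n ∈ v then s else n :: s) st
      = (table.filter (fun n => !decide (n ∈ v))).reverse ++ st := by
  induction table generalizing st with
  | nil => simp
  | cons n t ih =>
      by_cases h : n ∈ v <;> simp [List.foldl, h, ih, List.filter]

theorem ded_nil_of_sat (r v : List Int) (h : ∀ n ∈ r, n ∈ v) : ded r v = [] := by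
  induction r with
  | nil => rfl
  | cons n r' ih =>
      have hn : n ∈ v := h n (by simp)
      simp only [ded, if_pos hn]
      exact ih fun m hm => h m (by simp [hm])

theorem ded_step (r : List Int) : ∀ v c cs,
    r.filter (fun n => !decide (n ∈ v)) = c :: cs →
    ded r v = c :: ded r (v ++ [c]) := by
  induction r with
  | nil => intro v c cs h; simp at h
  | cons n r' ih =>
      intro v c cs h
      by_cases hn : n ∈ v
      · simp [List.filter, hn] at h
        simp [ded, hn, List.mem_append, ih v c cs h]
      · simp [List.filter, hn] at h
        obtain ⟨hc, _⟩ := h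
        subst hc
        simp [ded, hn]

-- when everything in the table is visited, the loop only drains the stack
theorem loop_drain (table : List Int) (v : List Int)
    (hsat : ∀ n ∈ table, n ∈ v) :
    ∀ st f, (∀ n ∈ st, n ∈ v) → st.length ≤ f → DFSloop table f st v = v := by
  intro st
  induction st generalizing v with
  | nil => intro f _ _; cases f <;> rfl
  | cons c st' ih =>
      intro f hst hf
      cases f with
      | zero => simp at hf
      | succ f' =>
          have hc : c ∈ v := hst c (by simp)
          have hfil : table.filter (fun n => !decide (n ∈ v)) = [] := by
            apply List.filter_eq_nil_iff.mpr
            intro n hn; simp [hsat n hn]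
          simp only [DFSloop, if_pos hc, push_eq, hfil, List.reverse_nil, List.nil_append]
          exact ih v hsat f' (fun n hn => hst n (by simp [hn])) (by simpa using hf)

-- main invariant: from a stack of the still-unvisited nodes (first-from-the-end
-- on top) over table-junk, the loop appends exactly 'ded table.reverse v'
theorem loop_main (table : List Int) : ∀ k v st f,
    (table.reverse.filter (fun n => !decide (n ∈ v))).length = k →
    (∀ n ∈ st, n ∈ table) →
    k * (table.length + 1) + st.length + 1 ≤ f →
    DFSloop table f (table.reverse.filter (fun n => !decide (n ∈ v)) ++ st) v
      = v ++ ded table.reverse v := by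
  intro k
  induction k using Nat.strong_induction_on with
  | _ k ih =>
      intro v st f hk hst hf
      cases hfil : table.reverse.filter (fun n => !decide (n ∈ v)) with
      | nil =>
          have hsat : ∀ n ∈ table, n ∈ v := by
            intro n hn
            by_contra hnv
            have : n ∈ table.reverse.filter (fun n => !decide (n ∈ v)) := by
              simp [List.mem_filter, hn, hnv]
            simp [hfil] at this
          rw [show ([] : List Int) ++ st = st from rfl,
            ded_nil_of_sat table.reverse v (fun n hn => hsat n (List.mem_reverse.mp hn)),
            List.append_nil]
          exact loop_drain table v hsat st f (fun n hn => hsat n (hst n hn)) (by omega)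
      | cons c cs =>
          have hkpos : k = cs.length + 1 := by
            rw [hfil] at hk; simpa using hk.symm
          cases f with
          | zero => omega
          | succ f' =>
              have hcv : c ∉ v := by
                have : c ∈ table.reverse.filter (fun n => !decide (n ∈ v)) := by
                  simp [hfil]
                simp [List.mem_filter] at this
                exact this.2
              have hcs : ∀ n ∈ cs, n ∈ table := by
                intro n hn
                have : n ∈ table.reverse.filter (fun n => !decide (n ∈ v)) := by
                  simp [hfil, hn]
                rw [List.mem_filter] at this
                exact List.mem_reverse.mp this.1
              have hctab : c ∈ table := by
                have : c ∈ table.reverse.filter (fun n => !decide (n ∈ v)) := by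
                  simp [hfil]
                rw [List.mem_filter] at this
                exact List.mem_reverse.mp this.1
              -- the filter with the enlarged visited list
              have hfil' : table.reverse.filter (fun n => !decide (n ∈ v ++ [c]))
                  = (table.reverse.filter (fun n => !decide (n ∈ v))).filter
                      (fun n => !decide (n = c)) := by
                rw [List.filter_filter]
                apply List.filter_congr
                intro n _
                by_cases h1 : n ∈ v <;> by_cases h2 : n = c <;> simp [h1, h2]
              have hlen' : (table.reverse.filter (fun n => !decide (n ∈ v ++ [c]))).length
                  ≤ cs.length := by
                rw [hfil', hfil]
                simp only [List.filter]
                simp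
                exact List.length_filter_le _ cs
              have hkle : k ≤ table.length := by
                have := List.length_filter_le (fun n => !decide (n ∈ v)) table.reverse
                rw [hk] at this; simpa using this
              rw [List.cons_append]
              rw [show DFSloop table (f' + 1) (c :: (cs ++ st)) v
                    = DFSloop table f'
                        (table.foldl
                          (fun s n => if n ∈ (if c ∈ v then v else v ++ [c]) then s else n :: s)
                          (cs ++ st))
                        (if c ∈ v then v else v ++ [c]) from rfl]
              rw [if_neg hcv] <;> rw [push_eq]
              have happ : (table.filter (fun n => !decide (n ∈ v ++ [c]))).reverse
                  = table.reverse.filter (fun n => !decide (n ∈ v ++ [c])) := by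
                rw [List.filter_reverse]
              rw [happ]
              have := ih (table.reverse.filter (fun n => !decide (n ∈ v ++ [c]))).length
                (by omega) (v ++ [c]) (cs ++ st) f' rfl
                (by intro n hn; rcases List.mem_append.mp hn with h | h
                    exacts [hcs n h, hst n h])
                (by
                  have hmul : (table.reverse.filter (fun n => !decide (n ∈ v ++ [c]))).length
                        * (table.length + 1) ≤ cs.length * (table.length + 1) :=
                    Nat.mul_le_mul_right _ hlen'
                  have hexp : k * (table.length + 1)
                      = cs.length * (table.length + 1) + (table.length + 1) := by
                    rw [hkpos]; ring
                  simp only [List.length_append]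
                  omega)
              rw [this, ded_step table.reverse v c cs hfil, List.append_assoc]
              rfl

-- B's fold with a Set equals the normal form
theorem alt_fold (r : List Int) : ∀ (seen : PySem.Set Int) (out v : List Int),
    (∀ n : Int, PySem.Set.contains seen n = true ↔ n ∈ v) →
    (r.foldl (fun p n => if PySem.Set.contains p.1 n then p
                         else (PySem.Set.add p.1 n, p.2 ++ [n])) (seen, out)).2
      = out ++ ded r v := by
  induction r with
  | nil => intro seen out v _; simp [ded]
  | cons n r' ih =>
      intro seen out v hinv
      by_cases hn : n ∈ v
      · have hc : PySem.Set.contains seen n = true := (hinv n).mpr hn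
        simp only [List.foldl, hc, ded, if_pos hn]
        exact ih seen out v hinv
      · have hc : PySem.Set.contains seen n = false := by
          by_contra h
          exact hn ((hinv n).mp (by revert h; cases PySem.Set.contains seen n <;> simp))
        simp only [List.foldl, hc, Bool.false_eq_true, if_false, ded, if_neg hn]
        rw [ih (PySem.Set.add seen n) (out ++ [n]) (v ++ [n])
          (by intro m
              simp only [PySem.Set.contains_iff, PySem.Set.mem_add, List.mem_append,
                List.mem_singleton]
              rw [← PySem.Set.contains_iff, hinv m])]
        simp

theorem DFS_alt_eq (table : List Int) (source : Int) :
    DFS_alt table source = [source] ++ ded table.reverse [source] := by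
  unfold DFS_alt
  exact alt_fold table.reverse (PySem.Set.ofList [source]) [source] [source]
    (by intro n; simp [PySem.Set.mem_ofList])

theorem DFS_eq (table : List Int) (source : Int) :
    DFS table source = [source] ++ ded table.reverse [source] := by
  unfold DFS
  have h1 : DFSloop table ((table.length + 1) * (table.length + 1) + 1) [source] []
      = DFSloop table ((table.length + 1) * (table.length + 1))
          (table.reverse.filter (fun n => !decide (n ∈ ([source] : List Int))) ++ []) [source] := by
    simp only [DFSloop]
    rw [push_eq, List.filter_reverse]
    simp
  rw [h1]
  have hk := List.length_filter_le (fun n => !decide (n ∈ ([source] : List Int))) table.reverse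
  exact loop_main table _ [source] [] _ rfl (by simp)
    (by simp at hk ⊢; nlinarith [hk])

-- ===== VERDICT (by name: the statement is the Claim_ definition above) =====
theorem DFS_spec : Claim_equal_DFS := by
  intro table source _
  unfold Spec_DFS
  rw [DFS_eq, DFS_alt_eq]
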